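-- pv_equiv track=rewrite | github.com/Bigerrr/CS61A | hw03/parsons_probs/neighbor_digits.py | neighbor_digits
-- ===== SOURCE A (Python) =====
-- def neighbor_digits(num, prev_digit=-1):
--     """
--     Returns the number of digits in num that have the same digit to its right
--     or left.
--     >>> neighbor_digits(111)
--     3
--     >>> neighbor_digits(123)
--     0
--     >>> neighbor_digits(112)
--     2
--     >>> neighbor_digits(1122)
--     4
--     """
--     "*** YOUR CODE HERE ***"
--     if num == 0:
--         return 0
--     count = 0
--     if (num % 10 == num // 10 % 10) or num % 10 == prev_digit:
--         count = 1
--     return count + neighbor_digits(num // 10, num % 10)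
-- ===== SOURCE B (Python) =====
-- def neighbor_digits(num, prev_digit=-1):
--     # Build the digit list (least significant first), then count with a single
--     # zip over each digit's left and right neighbors.
--     digits = []
--     n = num
--     while n:
--         digits.append(n % 10)
--         n //= 10
--     lefts = digits[1:] + [None]
--     rights = [prev_digit] + digits[:-1]
--     return sum(1 for d, l, r in zip(digits, lefts, rights) if d == l or d == r)
-- ===== Notes on version B (the rewrite author's own statement) =====
-- stated objective: alternative
-- what changed: Replaces A's tail recursion (carrying prev_digit through num//10 calls) with building the digit list once and one zip pass over each digit with its left and right neighbors.
import Mathlib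
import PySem

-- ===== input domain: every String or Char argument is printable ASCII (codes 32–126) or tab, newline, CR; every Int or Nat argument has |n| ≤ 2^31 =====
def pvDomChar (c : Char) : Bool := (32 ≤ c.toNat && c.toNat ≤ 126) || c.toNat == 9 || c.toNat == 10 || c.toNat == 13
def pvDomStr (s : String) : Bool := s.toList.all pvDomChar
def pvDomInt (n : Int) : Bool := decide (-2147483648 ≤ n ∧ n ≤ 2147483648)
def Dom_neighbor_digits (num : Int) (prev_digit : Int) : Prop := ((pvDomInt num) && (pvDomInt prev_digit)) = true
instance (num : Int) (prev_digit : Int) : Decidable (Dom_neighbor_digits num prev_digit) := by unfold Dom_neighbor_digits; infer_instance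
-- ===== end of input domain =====

-- B builds the digit list once and counts matches with one zip over each digit's
-- left/right neighbor, instead of A's tail recursion (objective: alternative decomposition).
-- A raises RecursionError on negative num (num // 10 never reaches 0); Pre_ excludes num < 0.

-- ===== PORT A =====
-- fuel-based transliteration of A's recursion; fuel 40 exceeds the digit count of any num in Dom
def neighborDigitsFuel : Nat → Int → Int → Int
  | 0, _, _ => 0
  | f + 1, num, prev_digit =>
    if num = 0 then 0
    else
      (if PySem.Int.mod num 10 = PySem.Int.mod (PySem.Int.floordiv num 10) 10
          ∨ PySem.Int.mod num 10 = prev_digit then 1 else 0)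
      + neighborDigitsFuel f (PySem.Int.floordiv num 10) (PySem.Int.mod num 10)

def neighbor_digits (num : Int) (prev_digit : Int) : Int :=
  neighborDigitsFuel 40 num prev_digit

-- ===== PORT B =====
-- digits of n, least significant first (fuel as for A)
def pvDigits : Nat → Int → List Int
  | 0, _ => []
  | f + 1, n => if n = 0 then [] else PySem.Int.mod n 10 :: pvDigits f (PySem.Int.floordiv n 10)

def neighbor_digits_alt (num : Int) (prev_digit : Int) : Int :=
  let digits := pvDigits 40 num
  let lefts : List (Option Int) := (digits.drop 1).map some ++ [none]   -- digits[1:] + [None]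
  let rights : List Int := prev_digit :: digits.dropLast                 -- [prev_digit] + digits[:-1]
  ((digits.zip (lefts.zip rights)).map
    (fun x => if some x.1 = x.2.1 ∨ x.1 = x.2.2 then (1 : Int) else 0)).sum

-- ===== PRECONDITION & SPEC =====
-- Pre_ excludes num < 0, on which Python A raises RecursionError (and B's while loop never terminates).
def Pre_neighbor_digits (num : Int) (prev_digit : Int) : Prop := 0 ≤ num
instance (num : Int) (prev_digit : Int) : Decidable (Pre_neighbor_digits num prev_digit) := by
  unfold Pre_neighbor_digits; infer_instance
def pvWitness_neighbor_digits : Int × Int := (1122, -1)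

def Spec_neighbor_digits (num : Int) (prev_digit : Int) (out : Int) : Prop := out = neighbor_digits_alt num prev_digit
instance (num : Int) (prev_digit : Int) (out : Int) : Decidable (Spec_neighbor_digits num prev_digit out) := by unfold Spec_neighbor_digits; infer_instance

-- ===== CLAIM (what is proved, stated in full; the proofs are below) =====
def Claim_equal_neighbor_digits : Prop := ∀ (num : Int) (prev_digit : Int), Dom_neighbor_digits num prev_digit → Pre_neighbor_digits num prev_digit → Spec_neighbor_digits num prev_digit (neighbor_digits num prev_digit)

-- ===== LEMMAS AND PROOFS =====

-- common reference: count over the digit list, carrying the previous digit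
def specND : List Int → Int → Int
  | [], _ => 0
  | d :: rest, prev => (if rest.head? = some d ∨ d = prev then 1 else 0) + specND rest d

lemma pvDigits_head (f : Nat) (n : Int) (hf : 0 < f) (hn : n ≠ 0) :
    (pvDigits f n).head? = some (PySem.Int.mod n 10) := by
  cases f with
  | zero => omega
  | succ f => simp [pvDigits, hn]

lemma neighborDigitsFuel_zero (f : Nat) (prev : Int) : neighborDigitsFuel f 0 prev = 0 := by
  cases f <;> simp [neighborDigitsFuel]

lemma lemA (f : Nat) (num prev : Int) (h0 : 0 ≤ num) (hf : num < 10 ^ f) :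
    neighborDigitsFuel f num prev = specND (pvDigits f num) prev := by
  induction f generalizing num prev with
  | zero =>
    have hf' : num < 1 := by simpa using hf
    have : num = 0 := by omega
    subst this; simp [neighborDigitsFuel, pvDigits, specND]
  | succ f ih =>
    by_cases hz : num = 0
    · subst hz; simp [neighborDigitsFuel, pvDigits, specND]
    · have hq : PySem.Int.floordiv num 10 = num / 10 :=
        PySem.Int.floordiv_eq_ediv_of_pos (by norm_num)
      have hq0 : 0 ≤ num / 10 := by positivity
      have hqlt : num / 10 < 10 ^ f := by
        have h1 : num < 10 * 10 ^ f := by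
          have := hf; rw [pow_succ] at this; linarith
        omega
      by_cases hq0' : num / 10 = 0
      · -- 1 ≤ num ≤ 9: single digit
        have h9 : num < 10 := by omega
        have hm : PySem.Int.mod num 10 = num := by
          rw [PySem.Int.mod_eq_emod_of_pos (by norm_num)]; omega
        simp only [neighborDigitsFuel, pvDigits, hz, if_neg hz, hq, hq0',
          neighborDigitsFuel_zero, specND]
        have htail : pvDigits f (0 : Int) = [] := by cases f <;> simp [pvDigits]
        simp [htail, specND, hm, PySem.Int.mod_eq_emod_of_pos (show (0:Int) < 10 by norm_num)]
        omega
      · have hne : (num / 10 : Int) ≠ 0 := hq0'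
        have hfpos : 0 < f := by
          rcases Nat.eq_zero_or_pos f with h | h
          · subst h; simp at hqlt; omega
          · exact h
        simp only [neighborDigitsFuel, pvDigits, if_neg hz, hq]
        rw [ih (num / 10) (PySem.Int.mod num 10) hq0 hqlt]
        simp only [specND]
        rw [pvDigits_head f (num / 10) hfpos hne]
        congr 1
        by_cases h1 : PySem.Int.mod num 10 = PySem.Int.mod (num / 10) 10 <;>
          by_cases h2 : PySem.Int.mod num 10 = prev <;> simp [h1, h2, eq_comm]

lemma lemB (digits : List Int) (prev : Int) :
    ((digits.zip (((digits.drop 1).map some ++ [none]).zip (prev :: digits.dropLast))).map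
      (fun x => if some x.1 = x.2.1 ∨ x.1 = x.2.2 then (1 : Int) else 0)).sum
    = specND digits prev := by
  induction digits generalizing prev with
  | nil => simp [specND]
  | cons d rest ih =>
    cases rest with
    | nil => simp [specND, eq_comm]
    | cons d' rest' =>
      have hdl : (d :: d' :: rest').dropLast = d :: (d' :: rest').dropLast := by
        simp [List.dropLast]
      rw [show specND (d :: d' :: rest') prev
          = (if (d' :: rest').head? = some d ∨ d = prev then 1 else 0) + specND (d' :: rest') d
          from rfl, ← ih d]
      simp only [List.drop_one, List.tail_cons, List.map_cons, hdl, List.zip_cons_cons,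
        List.cons_append, List.sum_cons, List.head?_cons]
      congr 1
      simp [eq_comm]

-- ===== VERDICT (by name: the statement is the Claim_ definition above) =====
theorem neighbor_digits_spec : Claim_equal_neighbor_digits := by
  intro num prev hdom hpre
  unfold Spec_neighbor_digits neighbor_digits neighbor_digits_alt
  have hb : num < 10 ^ 40 := by
    simp only [Dom_neighbor_digits, Bool.and_eq_true, pvDomInt, decide_eq_true_eq] at hdom
    have := hdom.1.2; norm_num; omega
  rw [lemA 40 num prev hpre hb, ← lemB (pvDigits 40 num) prev]
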